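-- pv_equiv track=rewrite | github.com/raja9112/Python | interview/count_flies_each_frog_can_eat.py | count_flies_each_frog_can_eat
-- ===== SOURCE A (Python) =====
-- def count_flies_each_frog_can_eat(X, S, Y):
--     res = [0] * len(X)
--
--     for i in range(len(X)):
--         position_of_frog = X[i]
--         size_of_tongue = S[i]
--         count = 0
--
--         for j in Y:
--             if abs(position_of_frog - j) <= size_of_tongue:
--                 count += 1
--
--             res[i] = count
--     return res
-- ===== SOURCE B (Python) =====
-- def count_flies_each_frog_can_eat(X, S, Y):
--     ys = sorted(Y)
--
--     def _bisect_left(a, x):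
--         # standard binary search: first index whose element is >= x
--         lo, hi = 0, len(a)
--         while lo < hi:
--             mid = (lo + hi) // 2
--             if a[mid] < x:
--                 lo = mid + 1
--             else:
--                 hi = mid
--         return lo
--
--     def _bisect_right(a, x):
--         # standard binary search: first index whose element is > x
--         lo, hi = 0, len(a)
--         while lo < hi:
--             mid = (lo + hi) // 2
--             if a[mid] <= x:
--                 lo = mid + 1
--             else:
--                 hi = mid
--         return lo
--
--     return [max(_bisect_right(ys, x + s) - _bisect_left(ys, x - s), 0)
--             for x, s in zip(X, S)]
-- ===== Notes on version B (the rewrite author's own statement) =====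
-- stated objective: faster
-- what changed: B sorts the flies once and, for each frog, binary-searches the bounds of the interval [x-s, x+s] instead of scanning all flies per frog.
import Mathlib
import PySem

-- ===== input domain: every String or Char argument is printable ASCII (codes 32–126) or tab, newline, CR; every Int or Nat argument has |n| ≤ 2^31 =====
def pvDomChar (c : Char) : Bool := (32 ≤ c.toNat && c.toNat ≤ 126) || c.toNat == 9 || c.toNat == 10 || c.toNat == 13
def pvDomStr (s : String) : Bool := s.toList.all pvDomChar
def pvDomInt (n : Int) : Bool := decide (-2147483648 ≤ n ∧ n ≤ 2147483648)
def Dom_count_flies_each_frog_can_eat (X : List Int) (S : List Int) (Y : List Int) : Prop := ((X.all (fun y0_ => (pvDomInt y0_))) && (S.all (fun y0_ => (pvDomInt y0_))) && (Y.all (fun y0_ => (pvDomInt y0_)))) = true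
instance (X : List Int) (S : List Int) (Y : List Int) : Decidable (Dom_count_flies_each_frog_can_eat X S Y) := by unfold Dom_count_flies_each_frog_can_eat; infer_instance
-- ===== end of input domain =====

-- B sorts the flies once and binary-searches the bounds of each frog's interval instead of
-- A's per-frog scan of all flies; the return values agree on every input where A returns.

-- ===== PORT A =====
-- literal transliteration of A: res = [0]*len(X); for i in range(len(X)): inner loop over Y
-- carrying (count, res), with 'res[i] = count' executed on every inner iteration.
def count_flies_each_frog_can_eat (X : List Int) (S : List Int) (Y : List Int) : List Int :=
  (PySem.List.pyRange 0 (X.length : Int) 1).foldl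
    (fun res i =>
      let position_of_frog := PySem.List.pyGetD X i 0
      let size_of_tongue := PySem.List.pyGetD S i 0
      (Y.foldl
        (fun (st : Int × List Int) j =>
          let count := if |position_of_frog - j| ≤ size_of_tongue then st.1 + 1 else st.1
          (count, PySem.List.pySetD st.2 i count))
        ((0 : Int), res)).2)
    (List.replicate X.length 0)

-- ===== PORT B =====
-- Source B's hand-written _bisect_left/_bisect_right are exactly the standard binary-search
-- loops that PySem.List.bisectLeft / bisectRight implement, so they are ported as those primitives.
def count_flies_each_frog_can_eat_alt (X : List Int) (S : List Int) (Y : List Int) : List Int :=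
  let ys := PySem.List.sorted Y (fun y => y) false
  (X.zip S).map (fun p =>
    max ((PySem.List.bisectRight ys (p.1 + p.2) : Int) - (PySem.List.bisectLeft ys (p.1 - p.2) : Int)) 0)

-- ===== PRECONDITION & SPEC =====
-- A raises IndexError on S[i] when len(S) < len(X); exactly those inputs are excluded.
def Pre_count_flies_each_frog_can_eat (X : List Int) (S : List Int) (Y : List Int) : Prop :=
  X.length ≤ S.length
instance (X : List Int) (S : List Int) (Y : List Int) : Decidable (Pre_count_flies_each_frog_can_eat X S Y) := by unfold Pre_count_flies_each_frog_can_eat; infer_instance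
def pvWitness_count_flies_each_frog_can_eat : List Int × List Int × List Int := ([0, 3], [1, 2], [2, -1, 4])

def Spec_count_flies_each_frog_can_eat (X : List Int) (S : List Int) (Y : List Int) (out : List Int) : Prop := out = count_flies_each_frog_can_eat_alt X S Y
instance (X : List Int) (S : List Int) (Y : List Int) (out : List Int) : Decidable (Spec_count_flies_each_frog_can_eat X S Y out) := by unfold Spec_count_flies_each_frog_can_eat; infer_instance

-- ===== CLAIM (what is proved, stated in full; the proofs are below) =====
def Claim_equal_count_flies_each_frog_can_eat : Prop := ∀ (X : List Int) (S : List Int) (Y : List Int), Dom_count_flies_each_frog_can_eat X S Y → Pre_count_flies_each_frog_can_eat X S Y → Spec_count_flies_each_frog_can_eat X S Y (count_flies_each_frog_can_eat X S Y)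

-- ===== LEMMAS AND PROOFS =====

-- the per-frog count both programs compute (as an Int)
def pvCnt (Y : List Int) (x s : Int) : Int :=
  (Y.countP (fun j => |x - j| ≤ s) : Int)

-- writing twice at the same index keeps only the second write
theorem pv_setD_setD (r : List Int) (i : Int) (a b : Int) :
    PySem.List.pySetD (PySem.List.pySetD r i a) i b = PySem.List.pySetD r i b := by
  simp only [PySem.List.pySetD, PySem.List.pySet?]
  rcases h : PySem.List.pyIdx? r.length i with _ | k
  · simp [h]
  · have hl : (r.set k a).length = r.length := by simp
    simp [h, hl, List.set_set]

-- inner loop of A: on nonempty Y it adds the count and writes it at index i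
theorem pv_innerA (x s : Int) (i : Int) :
    ∀ (Y : List Int) (c0 : Int) (res : List Int), Y ≠ [] →
      Y.foldl
        (fun (st : Int × List Int) j =>
          let count := if |x - j| ≤ s then st.1 + 1 else st.1
          (count, PySem.List.pySetD st.2 i count))
        (c0, res)
      = (c0 + pvCnt Y x s, PySem.List.pySetD res i (c0 + pvCnt Y x s)) := by
  intro Y
  induction Y with
  | nil => intro _ _ h; exact absurd rfl h
  | cons j t ih =>
    intro c0 res _
    simp only [List.foldl_cons]
    rcases eq_or_ne t [] with ht | ht
    · subst ht
      simp only [List.foldl_nil, pvCnt, List.countP_cons, List.countP_nil]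
      by_cases hp : |x - j| ≤ s <;> simp [hp]
    · rw [ih _ _ ht]
      rw [pv_setD_setD]
      have hc : (if |x - j| ≤ s then c0 + 1 else c0) + pvCnt t x s = c0 + pvCnt (j :: t) x s := by
        simp only [pvCnt, List.countP_cons]
        by_cases hp : |x - j| ≤ s <;> simp [hp] <;> ring
      rw [hc]

-- outer loop of A: successive writes at indices 0..m-1 replace the first m entries
theorem pv_outerA (v : Nat → Int) :
    ∀ (m : Nat) (r : List Int), m ≤ r.length →
      (List.range m).foldl (fun (r : List Int) (k : Nat) => PySem.List.pySetD r (k : Int) (v k)) r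
      = (List.range m).map v ++ r.drop m := by
  intro m
  induction m with
  | zero => intro r _; simp
  | succ m ih =>
    intro r hm
    rw [List.range_succ, List.foldl_append, List.foldl_cons, List.foldl_nil, ih r (by omega)]
    rw [PySem.List.pySetD_natCast, List.set_append_right _ _ (by simp), List.map_append]
    simp only [List.length_map, List.length_range, Nat.sub_self]
    have hdrop : r.drop m = r[m] :: r.drop (m+1) := List.drop_eq_getElem_cons (by omega)
    rw [hdrop, List.set_cons_zero]
    simp

-- a list's countP equals k when exactly the first k positions satisfy the predicate
theorem pv_countP_cut (p : Int → Bool) :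
    ∀ (l : List Int) (k : Nat), k ≤ l.length →
      (∀ j (hj : j < l.length), j < k → p l[j]) →
      (∀ j (hj : j < l.length), k ≤ j → ¬ p l[j]) →
      l.countP p = k := by
  intro l
  induction l with
  | nil => intro k hk _ _; simp at hk; simp [hk]
  | cons a t ih =>
    intro k hk h1 h2
    cases k with
    | zero =>
      have : ∀ x ∈ a :: t, ¬ p x := by
        intro x hx
        obtain ⟨j, hj, rfl⟩ := List.mem_iff_getElem.mp hx
        exact h2 j hj (Nat.zero_le j)
      rw [List.countP_eq_zero.mpr this]
    | succ k =>
      have hpa : p a := h1 0 (by simp) (by omega)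
      have ht : t.countP p = k := by
        apply ih k (by simpa using hk)
        · intro j hj hjk; exact h1 (j+1) (by simpa using hj) (by omega)
        · intro j hj hjk; exact h2 (j+1) (by simpa using hj) (by omega)
      simp [hpa, ht]

-- interval count from the two one-sided counts, with the max-0 clamp
theorem pv_interval_count (lo hi : Int) :
    ∀ (l : List Int),
      max ((l.countP (fun j => j ≤ hi) : Int) - (l.countP (fun j => j < lo) : Int)) 0
      = (l.countP (fun j => lo ≤ j ∧ j ≤ hi) : Int) := by
  intro l
  by_cases hlh : lo ≤ hi
  · have key : ∀ t : List Int, t.countP (fun j => j ≤ hi)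
        = t.countP (fun j => j < lo) + t.countP (fun j => lo ≤ j ∧ j ≤ hi) := by
      intro t
      induction t with
      | nil => simp
      | cons a t iht =>
        simp only [List.countP_cons, iht]
        split_ifs with h1 h2 h3 <;>
          simp only [decide_eq_true_eq, not_le, not_lt] at * <;> omega
    rw [key l]
    push_cast
    omega
  · have hz : l.countP (fun j => lo ≤ j ∧ j ≤ hi) = 0 := by
      apply List.countP_eq_zero.mpr
      intro x _
      simp only [decide_eq_true_eq]
      omega
    have hle : l.countP (fun j => j ≤ hi) ≤ l.countP (fun j => j < lo) := by
      apply List.countP_mono_left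
      intro x _ hx
      simp only [decide_eq_true_eq] at *
      omega
    rw [hz]
    push_cast
    omega

-- per-frog value of B equals the per-frog count of A
theorem pv_frog (Y : List Int) (x s : Int) :
    max ((PySem.List.bisectRight (PySem.List.sorted Y (fun y => y) false) (x + s) : Int)
          - (PySem.List.bisectLeft (PySem.List.sorted Y (fun y => y) false) (x - s) : Int)) 0
    = pvCnt Y x s := by
  set ys := PySem.List.sorted Y (fun y => y) false with hys
  have hp : List.Pairwise (fun a b : Int => a ≤ b) ys := PySem.List.sorted_pairwise Y (fun y => y)
  obtain ⟨hL1, hL2, hL3⟩ := PySem.List.bisectLeft_spec ys (x - s) hp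
  obtain ⟨hR1, hR2, hR3⟩ := PySem.List.bisectRight_spec ys (x + s) hp
  have hL : ys.countP (fun j => j < x - s) = PySem.List.bisectLeft ys (x - s) := by
    apply pv_countP_cut _ ys _ hL1
    · intro j hj hjk; simpa using hL2 j hj hjk
    · intro j hj hjk; simp only [decide_eq_true_eq, not_lt]; exact hL3 j hj hjk
  have hR : ys.countP (fun j => j ≤ x + s) = PySem.List.bisectRight ys (x + s) := by
    apply pv_countP_cut _ ys _ hR1
    · intro j hj hjk; simpa using hR2 j hj hjk
    · intro j hj hjk; simp only [decide_eq_true_eq, not_le]; exact hR3 j hj hjk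
  rw [← hL, ← hR, pv_interval_count (x - s) (x + s) ys]
  have hperm : ys.Perm Y := PySem.List.sorted_perm Y (fun y => y) false
  rw [pvCnt, ← hperm.countP_eq]
  congr 1
  apply List.countP_congr
  intro a _
  simp only [decide_eq_true_eq, abs_le]
  omega

-- the two ports agree whenever len(X) ≤ len(S)
theorem pv_main_eq (X S Y : List Int) (hpre : X.length ≤ S.length) :
    count_flies_each_frog_can_eat X S Y = count_flies_each_frog_can_eat_alt X S Y := by
  have hB : count_flies_each_frog_can_eat_alt X S Y
      = (List.range X.length).map (fun k => pvCnt Y (X.getD k 0) (S.getD k 0)) := by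
    unfold count_flies_each_frog_can_eat_alt
    apply List.ext_getElem
    · simp; omega
    · intro k hk1 hk2
      simp only [List.getElem_map, List.getElem_zip, List.getElem_range]
      rw [pv_frog]
      have hkX : k < X.length := by simpa using hk2
      have hkS : k < S.length := by omega
      rw [List.getD_eq_getElem?_getD, List.getD_eq_getElem?_getD,
        List.getElem?_eq_getElem hkX, List.getElem?_eq_getElem hkS]
      rfl
  rcases eq_or_ne Y [] with hY | hY
  · unfold count_flies_each_frog_can_eat
    subst hY
    simp only [List.foldl_nil]
    rw [List.foldl_fixed, hB]
    apply List.ext_getElem <;> simp [pvCnt]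
  · unfold count_flies_each_frog_can_eat
    rw [PySem.List.pyRange_zero_natCast, List.foldl_map]
    have hstep : ∀ (res : List Int) (k : Nat),
        (Y.foldl
          (fun (st : Int × List Int) j =>
            let count := if |PySem.List.pyGetD X (k : Int) 0 - j| ≤ PySem.List.pyGetD S (k : Int) 0 then st.1 + 1 else st.1
            (count, PySem.List.pySetD st.2 (k : Int) count))
          ((0 : Int), res)).2
        = PySem.List.pySetD res (k : Int) (pvCnt Y (X.getD k 0) (S.getD k 0)) := by
      intro res k
      rw [pv_innerA _ _ _ Y 0 res hY]
      simp [PySem.List.pyGetD_natCast]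
    simp only [hstep]
    rw [pv_outerA _ X.length (List.replicate X.length 0) (by simp)]
    simp [hB]

-- ===== VERDICT (by name: the statement is the Claim_ definition above) =====
theorem count_flies_each_frog_can_eat_spec : Claim_equal_count_flies_each_frog_can_eat := by
  intro X S Y _ hpre
  unfold Spec_count_flies_each_frog_can_eat
  exact pv_main_eq X S Y hpre
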